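-- pv_equiv track=rewrite | github.com/shakstzy/ULTRON | _shell/bin/ingest-imessage-oneshot.py | disambiguate_first_names
-- ===== SOURCE A (Python) =====
-- def disambiguate_first_names(handle_to_first):
--     """Given a map {handle: first_name}, detect collisions and return a
--     map {handle: display_name} where collided ones get full name."""
--     # Reverse map first → list of handles
--     counts = {}
--     for h, fn in handle_to_first.items():
--         counts.setdefault(fn, []).append(h)
--     out = dict(handle_to_first)
--     for fn, hs in counts.items():
--         if len(hs) > 1:
--             # Collision; can't safely shorten — fall back to handle
--             # (caller passes in full name; we'll use full name instead)
--             for h in hs: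
--                 out[h] = None  # signal: use full name
--     return out
-- ===== SOURCE B (Python) =====
-- def disambiguate_first_names(handle_to_first):
--     """Given a map {handle: first_name}, detect collisions and return a
--     map {handle: display_name} where collided ones get full name."""
--     # Sort the first names; a name collides iff it equals its neighbour in
--     # the sorted order, so one adjacent-pair scan finds all collided names.
--     vals = sorted(handle_to_first.values())
--     dup = {vals[i] for i in range(1, len(vals)) if vals[i] == vals[i - 1]}
--     return {h: (None if fn in dup else fn) for h, fn in handle_to_first.items()}
-- ===== Notes on version B (the rewrite author's own statement) =====
-- stated objective: alternative
-- what changed: B finds collided first names by sorting the values and scanning adjacent pairs of the sorted list (equal values become neighbours after sorting), then emits the result in one pass over the original mapping, instead of A's hash-grouping of handles into per-name buckets rewritten in a second loop over the groups.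
import Mathlib
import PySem

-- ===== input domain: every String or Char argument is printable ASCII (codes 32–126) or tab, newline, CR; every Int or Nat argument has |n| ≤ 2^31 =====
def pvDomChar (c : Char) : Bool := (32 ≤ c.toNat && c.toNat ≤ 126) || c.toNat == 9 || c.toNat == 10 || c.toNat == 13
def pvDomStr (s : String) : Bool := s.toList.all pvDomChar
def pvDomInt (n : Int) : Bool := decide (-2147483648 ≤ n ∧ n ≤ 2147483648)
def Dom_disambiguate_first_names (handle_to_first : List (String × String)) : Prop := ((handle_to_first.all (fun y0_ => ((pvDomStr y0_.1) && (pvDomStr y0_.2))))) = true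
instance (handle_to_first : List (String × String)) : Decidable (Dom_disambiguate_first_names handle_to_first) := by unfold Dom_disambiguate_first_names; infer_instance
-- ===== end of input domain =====

-- B finds collided first names by sorting the values and scanning adjacent pairs (equal values are
-- neighbours after sorting), then emits the result in one pass over the original mapping, instead of
-- A's hash-grouping of handles into per-name buckets rewritten in a second loop over the groups
-- (objective: alternative algorithm, same result).

-- ===== PORT A =====
-- counts.setdefault(fn, []).append(h)  =  counts[fn] = counts.get(fn, []) + [h]  (Dict.modify)
-- out = dict(handle_to_first): the copy, values wrapped in `some` since collided ones become None
def disambiguate_first_names (handle_to_first : List (String × String)) : List (String × Option String) :=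
  let counts : PySem.Dict String (List String) :=
    handle_to_first.foldl (fun d p => d.modify p.2 [] (fun hs => hs ++ [p.1])) PySem.Dict.empty
  let out0 : PySem.Dict String (Option String) :=
    handle_to_first.foldl (fun d p => d.insert p.1 (some p.2)) PySem.Dict.empty
  let out :=
    counts.items.foldl
      (fun o q => if q.2.length > 1 then q.2.foldl (fun o h => o.insert h none) o else o) out0
  out.items

-- ===== PORT B =====
-- vals = sorted(handle_to_first.values()); dup = {vals[i] for i in range(1, len(vals)) if vals[i] == vals[i-1]};
-- then one dict comprehension over the original mapping
def disambiguate_first_names_alt (handle_to_first : List (String × String)) : List (String × Option String) :=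
  let vals := PySem.List.sorted (handle_to_first.map (fun p => p.2)) (fun x => x) false
  let dup : PySem.Set String :=
    PySem.Set.ofList
      (((PySem.List.pyRange 1 (PySem.List.len vals) 1).filter
          (fun i => PySem.List.pyGetD vals i "" == PySem.List.pyGetD vals (i - 1) "")).map
        (fun i => PySem.List.pyGetD vals i ""))
  (handle_to_first.foldl
    (fun out p => out.insert p.1 (if dup.contains p.2 then none else some p.2))
    PySem.Dict.empty).items

-- ===== PRECONDITION & SPEC =====
-- Pre_ states that the handles (keys) are pairwise distinct: the Python argument is a dict, whose
-- items list always has unique keys, so a pair list with a duplicated handle represents no Python call.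
def Pre_disambiguate_first_names (handle_to_first : List (String × String)) : Prop :=
  (handle_to_first.map Prod.fst).Nodup
instance (handle_to_first : List (String × String)) : Decidable (Pre_disambiguate_first_names handle_to_first) := by
  unfold Pre_disambiguate_first_names; infer_instance
def pvWitness_disambiguate_first_names : (List (String × String)) :=
  [("a", "Bob"), ("b", "Bob"), ("c", "Al")]
def Spec_disambiguate_first_names (handle_to_first : List (String × String)) (out : List (String × Option String)) : Prop := out = disambiguate_first_names_alt handle_to_first
instance (handle_to_first : List (String × String)) (out : List (String × Option String)) : Decidable (Spec_disambiguate_first_names handle_to_first out) := by unfold Spec_disambiguate_first_names; infer_instance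

-- ===== CLAIM (what is proved, stated in full; the proofs are below) =====
def Claim_equal_disambiguate_first_names : Prop := ∀ (handle_to_first : List (String × String)), Dom_disambiguate_first_names handle_to_first → Pre_disambiguate_first_names handle_to_first → Spec_disambiguate_first_names handle_to_first (disambiguate_first_names handle_to_first)

-- ===== LEMMAS AND PROOFS =====

-- canonical form both ports are proved equal to
def pvCanon (l : List (String × String)) : List (String × Option String) :=
  l.map (fun p => (p.1, if 1 < (l.map (fun q : String × String => q.2)).count p.2 then none else some p.2))

lemma contains_foldl_insert_none (hs : List String) (o : PySem.Dict String (Option String))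
    (x : String) (hx : o.contains x = true) :
    (hs.foldl (fun o h => o.insert h none) o).contains x = true := by
  induction hs generalizing o with
  | nil => exact hx
  | cons h t ih =>
    simp only [List.foldl_cons]
    exact ih _ (by rw [PySem.Dict.contains_insert]; simp [hx])

lemma items_foldl_insert_none (hs : List String) (o : PySem.Dict String (Option String))
    (hmem : ∀ h ∈ hs, o.contains h = true) :
    (hs.foldl (fun o h => o.insert h none) o).items
      = o.items.map (fun q => if q.1 ∈ hs then (q.1, (none : Option String)) else q) := by
  induction hs generalizing o with
  | nil => simp
  | cons h t ih =>
    simp only [List.foldl_cons]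
    rw [ih _ (fun x hx => by rw [PySem.Dict.contains_insert]; simp [hmem x (List.mem_cons_of_mem _ hx)]),
        PySem.Dict.items_insert_of_contains _ _ (hmem h (List.mem_cons_self))]
    rw [List.map_map]
    apply List.map_congr_left
    intro q hq
    by_cases hqh : q.1 = h
    · simp [hqh, ite_self]
    · simp [Function.comp, hqh]

lemma items_foldl_groups (G : List (String × List String)) (o : PySem.Dict String (Option String))
    (hmem : ∀ g ∈ G, ∀ h ∈ g.2, o.contains h = true) :
    (G.foldl (fun o q => if q.2.length > 1 then q.2.foldl (fun o h => o.insert h none) o else o) o).items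
      = o.items.map (fun q => if ∃ g ∈ G, g.2.length > 1 ∧ q.1 ∈ g.2 then (q.1, (none : Option String)) else q) := by
  induction G generalizing o with
  | nil => simp
  | cons g t ih =>
    simp only [List.foldl_cons]
    by_cases hg : g.2.length > 1
    · rw [if_pos hg,
          ih _ (fun g' hg' x hx => contains_foldl_insert_none _ _ _ (hmem g' (List.mem_cons_of_mem _ hg') x hx)),
          items_foldl_insert_none _ _ (hmem g (List.mem_cons_self)), List.map_map]
      apply List.map_congr_left
      intro q hq
      by_cases hqg : q.1 ∈ g.2
      · have hc : ∃ g' ∈ g :: t, g'.2.length > 1 ∧ q.1 ∈ g'.2 := ⟨g, List.mem_cons_self, hg, hqg⟩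
        simp only [Function.comp, if_pos hqg, if_pos hc, ite_self]
      · simp only [Function.comp, if_neg hqg]
        congr 1
        simp only [eq_iff_iff]
        constructor
        · rintro ⟨g', hg', hlen, hmem'⟩; exact ⟨g', List.mem_cons.mpr (Or.inr hg'), hlen, hmem'⟩
        · rintro ⟨g', hg', hlen, hmem'⟩
          rcases List.mem_cons.mp hg' with rfl|h
          · exact absurd hmem' hqg
          · exact ⟨g', h, hlen, hmem'⟩
    · rw [if_neg hg, ih _ (fun g' hg' => hmem g' (List.mem_cons_of_mem _ hg'))]
      apply List.map_congr_left
      intro q hq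
      congr 1
      simp only [eq_iff_iff]
      constructor
      · rintro ⟨g', hg', hlen, hmem'⟩; exact ⟨g', List.mem_cons.mpr (Or.inr hg'), hlen, hmem'⟩
      · rintro ⟨g', hg', hlen, hmem'⟩
        rcases List.mem_cons.mp hg' with rfl|h
        · exact absurd hlen hg
        · exact ⟨g', h, hlen, hmem'⟩

lemma A_eq_canon (l : List (String × String)) (hpre : (l.map Prod.fst).Nodup) :
    disambiguate_first_names l = pvCanon l := by
  unfold disambiguate_first_names pvCanon
  simp only []
  set vals := l.map (fun p : String × String => p.2) with hvals
  set counts := l.foldl (fun d p => d.modify p.2 [] (fun hs => hs ++ [p.1]))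
      (PySem.Dict.empty : PySem.Dict String (List String)) with hcounts
  have hA0 : (l.foldl (fun d p => d.insert p.1 (some p.2))
        (PySem.Dict.empty : PySem.Dict String (Option String))).items
      = l.map (fun p => (p.1, (some p.2 : Option String))) := by
    have := PySem.Dict.items_foldl_insert_fresh l (fun p : String × String => p.1)
      (fun p => (some p.2 : Option String)) PySem.Dict.empty (fun a _ => rfl) hpre
    simpa using this
  have hgetD : ∀ c, counts.getD c [] = (l.filter (fun p => p.2 == c)).map (fun p => p.1) := by
    intro c
    have h1 : counts = (l.map (fun q : String × String => (q.2, q.1))).foldl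
        (fun d p => d.modify p.1 [] (fun hs => hs ++ [p.2])) PySem.Dict.empty := by
      rw [List.foldl_map]
    rw [h1, PySem.Dict.getD_foldl_modify_append]
    rw [List.filter_map, List.map_map]
    rfl
  have hkeys : counts.keys = PySem.Set.ofList vals := by
    rw [hcounts, PySem.Dict.keys_foldl_modify_key l (fun p : String × String => p.2) []
      (fun _ p => fun hs => hs ++ [p.1])]
    simp [hvals]
    rfl
  have hnodk : counts.keys.Nodup := by
    rw [hcounts]
    exact PySem.Dict.nodup_keys_foldl_modify_key _ _ _ _ _ PySem.Dict.nodup_keys_empty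
  have hitems : counts.items = (PySem.Set.ofList vals).map
      (fun fn => (fn, (l.filter (fun p => p.2 == fn)).map (fun p => p.1))) := by
    rw [PySem.Dict.items_eq_map_keys counts hnodk [], hkeys]
    exact List.map_congr_left (fun k _ => by rw [hgetD])
  have hkeys0 : (l.foldl (fun d p => d.insert p.1 (some p.2))
      (PySem.Dict.empty : PySem.Dict String (Option String))).keys = l.map (fun p => p.1) := by
    simp only [PySem.Dict.keys, hA0, List.map_map]
    rfl
  rw [items_foldl_groups _ _ (by
    intro g hg h hh
    rw [hitems] at hg
    obtain ⟨fn, hfn, rfl⟩ := List.mem_map.mp hg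
    obtain ⟨q, hq, rfl⟩ := List.mem_map.mp hh
    rw [PySem.Dict.contains_iff_mem_keys, hkeys0]
    exact List.mem_map.mpr ⟨q, (List.mem_filter.mp hq).1, rfl⟩), hA0, List.map_map]
  apply List.map_congr_left
  intro p hp
  have hlenfilter : ((l.filter (fun q => q.2 == p.2)).length) = vals.count p.2 := by
    rw [hvals, List.count_eq_countP, List.countP_map, ← List.countP_eq_length_filter]
    rfl
  have hcond : (∃ g ∈ counts.items, g.2.length > 1 ∧ p.1 ∈ g.2) ↔ 1 < vals.count p.2 := by
    rw [hitems]
    constructor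
    · rintro ⟨g, hg, hlen, hmem'⟩
      obtain ⟨fn, hfn, rfl⟩ := List.mem_map.mp hg
      obtain ⟨q, hq, hq1⟩ := List.mem_map.mp hmem'
      obtain ⟨hql, hqfn⟩ := List.mem_filter.mp hq
      have hqp : q = p := List.inj_on_of_nodup_map hpre hql hp hq1
      have hfnp : fn = p.2 := by
        subst hqp
        exact (beq_iff_eq.mp hqfn).symm
      subst hfnp
      simpa [List.length_map, hlenfilter] using hlen
    · intro hc
      refine ⟨(p.2, (l.filter (fun q => q.2 == p.2)).map (fun q => q.1)), ?_, ?_, ?_⟩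
      · exact List.mem_map.mpr ⟨p.2, (PySem.Set.mem_ofList _ _).mpr (List.mem_map.mpr ⟨p, hp, rfl⟩), rfl⟩
      · simpa [List.length_map, hlenfilter] using hc
      · exact List.mem_map.mpr ⟨p, List.mem_filter.mpr ⟨hp, by simp⟩, rfl⟩
  show (fun q : String × Option String =>
      if ∃ g ∈ counts.items, g.2.length > 1 ∧ q.1 ∈ g.2 then (q.1, (none : Option String)) else q)
        (p.1, some p.2)
    = (p.1, if 1 < vals.count p.2 then none else some p.2)
  by_cases hc : 1 < vals.count p.2
  · simp only [if_pos (hcond.mpr hc), if_pos hc]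
  · simp only [if_neg (fun h => hc (hcond.mp h)), if_neg hc]

-- in a ≤-sorted list, a value has an adjacent equal neighbour iff it occurs at least twice
lemma adj_dup_iff_count (v : List String) (hs : v.Pairwise (· ≤ ·)) (x : String) :
    (∃ (k : Nat) (h : k + 1 < v.length), v[k+1] = v[k] ∧ v[k+1] = x)
      ↔ 2 ≤ v.count x := by
  induction v with
  | nil => simp
  | cons a t ih =>
    obtain ⟨ha, ht⟩ := List.pairwise_cons.mp hs
    constructor
    · rintro ⟨k, hk, heq, hx⟩
      cases k with
      | zero =>
        have htlen : 0 < t.length := by simp at hk; omega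
        have h0 : t[0] = x := by simpa using hx
        have hax : a = x := by
          have h0a : t[0] = a := by simpa using heq
          rw [← h0a, h0]
        have hxt : x ∈ t := h0 ▸ List.getElem_mem htlen
        have h1 : 1 ≤ t.count x := List.one_le_count_iff.mpr hxt
        rw [List.count_cons, if_pos (by simp [hax])]
        omega
      | succ k' =>
        have hk' : k' + 1 < t.length := by simpa using hk
        have h1 : t[k'+1] = t[k'] := by simpa using heq
        have h2 : t[k'+1] = x := by simpa using hx
        have := (ih ht).mp ⟨k', hk', h1, h2⟩
        rw [List.count_cons]
        omega
    · intro hc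
      by_cases hax : a = x
      · -- x = a occurs again in t; since a ≤ everything in t and t is sorted, t[0] = x
        subst hax
        have hxt : a ∈ t := by
          rw [List.count_cons, if_pos (by simp)] at hc
          exact List.one_le_count_iff.mp (by omega)
        obtain ⟨j, hj, hje⟩ := List.getElem_of_mem hxt
        have h0j : t[0]'(by omega) ≤ t[j] := by
          rcases Nat.eq_zero_or_pos j with hj0 | hj0
          · subst hj0; exact le_refl _
          · exact (List.pairwise_iff_getElem.mp ht) 0 j (by omega) hj hj0
        have ha0 : a ≤ t[0]'(by omega) := ha _ (List.getElem_mem (by omega))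
        have h0 : t[0]'(by omega) = a := le_antisymm (hje ▸ h0j) ha0
        refine ⟨0, by simp; omega, ?_, ?_⟩
        · show (a :: t)[0+1]'(by simp; omega) = (a :: t)[0]'(by simp)
          simpa using h0
        · show (a :: t)[0+1]'(by simp; omega) = a
          simpa using h0
      · have hct : 2 ≤ t.count x := by
          rw [List.count_cons, if_neg (by simpa using hax)] at hc
          omega
        obtain ⟨k, hk, h1, h2⟩ := (ih ht).mpr hct
        exact ⟨k + 1, by simpa using hk, by simpa using h1, by simpa using h2⟩

-- two equal elements at distinct positions occur at least twice
lemma count_two_of_two_idx (v : List String) (i j : Nat) (hij : i < j) (hj : j < v.length)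
    (x : String) (h1 : v[i]'(by omega) = x) (h2 : v[j] = x) : 2 ≤ v.count x := by
  rw [← List.duplicate_iff_two_le_count, List.duplicate_iff_sublist]
  refine List.cons_sublist_iff.mpr ⟨v.take j, v.drop j, (List.take_append_drop j v).symm, ?_, ?_⟩
  · have hmem : (v.take j)[i]'(by simp; omega) ∈ v.take j := List.getElem_mem _
    rw [List.getElem_take] at hmem
    rwa [h1] at hmem
  · rw [List.drop_eq_getElem_cons hj, h2]
    exact List.cons_sublist_cons.mpr (List.nil_sublist _)

lemma B_eq_canon (l : List (String × String)) (hpre : (l.map Prod.fst).Nodup) :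
    disambiguate_first_names_alt l = pvCanon l := by
  unfold disambiguate_first_names_alt pvCanon
  simp only []
  set vals0 := l.map (fun p : String × String => p.2) with hvals0
  set v := PySem.List.sorted vals0 (fun x => x) false with hv
  set dupsrc := ((PySem.List.pyRange 1 (PySem.List.len v) 1).filter
      (fun i => PySem.List.pyGetD v i "" == PySem.List.pyGetD v (i - 1) "")).map
      (fun i => PySem.List.pyGetD v i "") with hdupsrc
  have hperm : v.Perm vals0 := PySem.List.sorted_perm _ _ _
  have hsorted : v.Pairwise (· ≤ ·) := PySem.List.sorted_pairwise vals0 (fun x => x)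
  have hlen : (PySem.List.len v) = (v.length : Int) := PySem.List.len_eq v
  have hB : (l.foldl (fun out p =>
        out.insert p.1 (if (PySem.Set.ofList dupsrc).contains p.2 then none else some p.2))
        (PySem.Dict.empty : PySem.Dict String (Option String))).items
      = l.map (fun p => (p.1, if (PySem.Set.ofList dupsrc).contains p.2 then (none : Option String) else some p.2)) := by
    have := PySem.Dict.items_foldl_insert_fresh l (fun p : String × String => p.1)
      (fun p => if (PySem.Set.ofList dupsrc).contains p.2 then (none : Option String) else some p.2)
      PySem.Dict.empty (fun a _ => rfl) hpre
    simpa using this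
  rw [hB]
  apply List.map_congr_left
  intro p hp
  have hmemdup : (PySem.Set.ofList dupsrc).contains p.2 = true ↔ 1 < vals0.count p.2 := by
    rw [show ((PySem.Set.ofList dupsrc).contains p.2 = true) ↔ p.2 ∈ PySem.Set.ofList dupsrc from by
          simp [PySem.Set.contains],
        PySem.Set.mem_ofList, hdupsrc, ← hperm.count_eq,
        show (1 < v.count p.2) ↔ 2 ≤ v.count p.2 from by omega]
    constructor
    · intro hm
      obtain ⟨i, hi, hx⟩ := List.mem_map.mp hm
      obtain ⟨hir, hpred⟩ := List.mem_filter.mp hi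
      have hrange : 1 ≤ i ∧ i < PySem.List.len v := (PySem.List.mem_pyRange_one).mp hir
      have e1 : PySem.List.pyGetD v i "" = v[i.toNat]'(by omega) := by
        apply PySem.List.pyGetD_eq_getElem <;> omega
      have e2 : PySem.List.pyGetD v (i - 1) "" = v[(i-1).toNat]'(by omega) := by
        apply PySem.List.pyGetD_eq_getElem <;> omega
      have hpe : v[i.toNat]'(by omega) = v[(i-1).toNat]'(by omega) := by
        have := beq_iff_eq.mp hpred
        rw [e1, e2] at this
        exact this
      have hxv : v[i.toNat]'(by omega) = p.2 := by rw [← e1]; exact hx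
      exact count_two_of_two_idx v ((i-1).toNat) i.toNat (by omega) (by omega) p.2
        (hpe ▸ hxv) hxv
    · intro hc
      obtain ⟨k, hk, heq, hx⟩ := (adj_dup_iff_count v hsorted p.2).mpr hc
      refine List.mem_map.mpr ⟨((k + 1 : Nat) : Int), List.mem_filter.mpr ⟨?_, ?_⟩, ?_⟩
      · apply (PySem.List.mem_pyRange_one).mpr
        refine ⟨by omega, ?_⟩
        rw [hlen]
        exact_mod_cast hk
      · apply beq_iff_eq.mpr
        have e1 : PySem.List.pyGetD v ((k + 1 : Nat) : Int) "" = v[k+1] := by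
          apply PySem.List.pyGetD_eq_getElem
          · omega
          · exact_mod_cast hk
        have e2 : PySem.List.pyGetD v (((k + 1 : Nat) : Int) - 1) "" = v[k] := by
          have h : (((k + 1 : Nat) : Int) - 1) = ((k : Nat) : Int) := by push_cast; ring
          rw [h]
          apply PySem.List.pyGetD_eq_getElem
          · omega
          · exact_mod_cast (by omega : k < v.length)
        rw [e1, e2]; exact heq
      · have e1 : PySem.List.pyGetD v ((k + 1 : Nat) : Int) "" = v[k+1] := by
          apply PySem.List.pyGetD_eq_getElem
          · omega
          · exact_mod_cast hk
        rw [e1]; exact hx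
  by_cases hc : 1 < vals0.count p.2
  · simp only [if_pos (hmemdup.mpr hc), if_pos hc]
  · have hne : (PySem.Set.ofList dupsrc).contains p.2 = false :=
      Bool.eq_false_iff.mpr (fun h => hc (hmemdup.mp h))
    simp only [hne, if_neg hc, Bool.false_eq_true, if_false]

-- ===== VERDICT (by name: the statement is the Claim_ definition above) =====
theorem disambiguate_first_names_spec : Claim_equal_disambiguate_first_names := by
  intro handle_to_first _hdom hpre
  unfold Spec_disambiguate_first_names
  rw [A_eq_canon handle_to_first hpre, B_eq_canon handle_to_first hpre]
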